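-- pv_equiv track=rewrite | github.com/YoungHoKwon1/rlid-net | src/core/lid_manager.py | _remove_existing_lid_sections
-- ===== SOURCE A (Python) =====
-- from typing import Dict, List, Optional, Tuple
--
-- def _remove_existing_lid_sections(lines: List[str]) -> List[str]:
--     """Remove any existing LID_CONTROLS and LID_USAGE sections"""
--     result_lines = []
--     skip_section = False
--
--     for line in lines:
--         stripped = line.strip()
--
--         # Check if we're entering a LID section
--         if stripped in ['[LID_CONTROLS]', '[LID_USAGE]']:
--             skip_section = True
--             continue
--
--         # Check if we're entering a different section (exit LID section)
--         if stripped.startswith('[') and stripped not in ['[LID_CONTROLS]', '[LID_USAGE]']: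
--             skip_section = False
--
--         # Add line if we're not in a LID section
--         if not skip_section:
--             result_lines.append(line)
--
--     return result_lines
-- ===== SOURCE B (Python) =====
-- from typing import List
--
-- def _remove_existing_lid_sections(lines: List[str]) -> List[str]:
--     """Partition into preamble + header-delimited sections, then keep all non-LID buffers."""
--     LID = {'[LID_CONTROLS]', '[LID_USAGE]'}
--     out: List[str] = []
--     cur_key = None          # stripped header of the current buffer (None = preamble)
--     cur: List[str] = []
--     for line in lines:
--         s = line.strip()
--         if s.startswith('['):
--             if cur_key not in LID:
--                 out.extend(cur)
--             cur_key, cur = s, [line]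
--         else:
--             cur.append(line)
--     if cur_key not in LID:
--         out.extend(cur)
--     return out
-- ===== Notes on version B (the rewrite author's own statement) =====
-- stated objective: alternative
-- what changed: Replaces the skip-flag state machine with a partition into header-delimited section buffers that are kept or dropped wholesale.
import Mathlib
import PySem

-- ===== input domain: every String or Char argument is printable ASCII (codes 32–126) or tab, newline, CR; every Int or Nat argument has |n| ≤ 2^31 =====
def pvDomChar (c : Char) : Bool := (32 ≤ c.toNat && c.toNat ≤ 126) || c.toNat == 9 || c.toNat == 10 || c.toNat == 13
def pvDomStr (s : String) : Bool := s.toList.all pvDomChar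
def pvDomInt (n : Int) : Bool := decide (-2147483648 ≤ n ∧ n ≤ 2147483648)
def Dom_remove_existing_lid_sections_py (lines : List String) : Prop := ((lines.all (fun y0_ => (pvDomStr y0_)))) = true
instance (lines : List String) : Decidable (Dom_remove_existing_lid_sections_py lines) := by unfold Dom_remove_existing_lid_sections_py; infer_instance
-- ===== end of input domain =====

-- B replaces A's skip-flag state machine by a partition into header-delimited section buffers
-- kept or dropped wholesale (objective: alternative decomposition; same cost).


-- ===== PORT A =====
-- 'stripped in ['[LID_CONTROLS]', '[LID_USAGE]']'
def pvIsLidStr (s : String) : Bool := s == "[LID_CONTROLS]" || s == "[LID_USAGE]"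

-- one iteration of A's for-loop; state = (result_lines, skip_section)
def pvAStep (st : List String × Bool) (line : String) : List String × Bool :=
  let stripped := PySem.Str.strip line
  if pvIsLidStr stripped then (st.1, true)        -- skip_section = True; continue
  else
    let skip := if PySem.Str.startswith stripped "[" && !pvIsLidStr stripped then false else st.2
    if !skip then (st.1 ++ [line], skip) else (st.1, skip)

def remove_existing_lid_sections_py (lines : List String) : List String :=
  (lines.foldl pvAStep ([], false)).1

-- ===== PORT B =====
-- 'cur_key not in LID' (cur_key : Option, none = preamble)
def pvIsLidKey (k : Option String) : Bool :=
  match k with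
  | some s => pvIsLidStr s
  | none => false

-- one iteration of B's loop; state = (out, cur_key, cur)
def pvBStep (st : List String × Option String × List String) (line : String) :
    List String × Option String × List String :=
  let s := PySem.Str.strip line
  if PySem.Str.startswith s "[" then
    ((if pvIsLidKey st.2.1 then st.1 else st.1 ++ st.2.2), some s, [line])
  else
    (st.1, st.2.1, st.2.2 ++ [line])

-- B's final flush: 'if cur_key not in LID: out.extend(cur)'
def pvBFinish (st : List String × Option String × List String) : List String :=
  if pvIsLidKey st.2.1 then st.1 else st.1 ++ st.2.2

def remove_existing_lid_sections_py_alt (lines : List String) : List String :=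
  pvBFinish (lines.foldl pvBStep ([], none, []))

-- ===== PRECONDITION & SPEC =====
def Spec_remove_existing_lid_sections_py (lines : List String) (out : List String) : Prop := out = remove_existing_lid_sections_py_alt lines
instance (lines : List String) (out : List String) : Decidable (Spec_remove_existing_lid_sections_py lines out) := by unfold Spec_remove_existing_lid_sections_py; infer_instance

-- ===== CLAIM (what is proved, stated in full; the proofs are below) =====
def Claim_equal_remove_existing_lid_sections_py : Prop := ∀ (lines : List String), Dom_remove_existing_lid_sections_py lines → Spec_remove_existing_lid_sections_py lines (remove_existing_lid_sections_py lines)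

-- ===== LEMMAS AND PROOFS =====

-- a LID header string starts with '['
lemma pvLid_startswith (s : String) (h : pvIsLidStr s = true) :
    PySem.Str.startswith s "[" = true := by
  simp only [pvIsLidStr, Bool.or_eq_true, beq_iff_eq] at h
  rcases h with h | h <;> subst h <;>
    (rw [PySem.Str.startswith_eq, PySem.Chars.startswith_iff]; decide)

-- evaluation of one A-step in each of the three cases
lemma pvAStep_lid (res : List String) (sk : Bool) (line : String)
    (h : pvIsLidStr (PySem.Str.strip line) = true) :
    pvAStep (res, sk) line = (res, true) := by
  simp only [pvAStep, h, reduceIte]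

lemma pvAStep_hdr (res : List String) (sk : Bool) (line : String)
    (h : pvIsLidStr (PySem.Str.strip line) = false)
    (hs : PySem.Str.startswith (PySem.Str.strip line) "[" = true) :
    pvAStep (res, sk) line = (res ++ [line], false) := by
  simp only [pvAStep, h, hs, Bool.not_false, Bool.and_true,
    Bool.false_eq_true, reduceIte]

lemma pvAStep_plain (res : List String) (sk : Bool) (line : String)
    (h : pvIsLidStr (PySem.Str.strip line) = false)
    (hs : PySem.Str.startswith (PySem.Str.strip line) "[" = false) :
    pvAStep (res, sk) line = (if sk then (res, sk) else (res ++ [line], sk)) := by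
  cases sk <;>
    simp only [pvAStep, h, hs, Bool.not_false, Bool.not_true, Bool.false_and,
      Bool.false_eq_true, reduceIte]

-- evaluation of one B-step in the two cases
lemma pvBStep_hdr (out cur : List String) (key : Option String) (line : String)
    (hs : PySem.Str.startswith (PySem.Str.strip line) "[" = true) :
    pvBStep (out, key, cur) line
      = (pvBFinish (out, key, cur), some (PySem.Str.strip line), [line]) := by
  simp only [pvBStep, pvBFinish, hs, reduceIte]

lemma pvBStep_plain (out cur : List String) (key : Option String) (line : String)
    (hs : PySem.Str.startswith (PySem.Str.strip line) "[" = false) :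
    pvBStep (out, key, cur) line = (out, key, cur ++ [line]) := by
  simp only [pvBStep, hs, Bool.false_eq_true, reduceIte]

lemma pvIsLidKey_some (s : String) : pvIsLidKey (some s) = pvIsLidStr s := rfl

-- loop invariant: A's running state is (B's flushed output, "current section is LID")
lemma pv_inv (lines : List String) : ∀ (out cur : List String) (key : Option String),
    (lines.foldl pvAStep (pvBFinish (out, key, cur), pvIsLidKey key)).1
      = pvBFinish (lines.foldl pvBStep (out, key, cur)) := by
  induction lines with
  | nil => intro out cur key; rfl
  | cons line rest ih =>
    intro out cur key
    simp only [List.foldl_cons]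
    cases hl : pvIsLidStr (PySem.Str.strip line) with
    | true =>
      rw [pvAStep_lid _ _ _ hl, pvBStep_hdr _ _ _ _ (pvLid_startswith _ hl)]
      have h2 := ih (pvBFinish (out, key, cur)) [line] (some (PySem.Str.strip line))
      rw [pvIsLidKey_some, hl] at h2
      have hfin : pvBFinish (pvBFinish (out, key, cur), some (PySem.Str.strip line), [line])
          = pvBFinish (out, key, cur) := by
        simp only [pvBFinish, pvIsLidKey_some, hl, reduceIte]
      rw [hfin] at h2
      exact h2
    | false =>
      cases hsw : PySem.Str.startswith (PySem.Str.strip line) "[" with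
      | true =>
        rw [pvAStep_hdr _ _ _ hl hsw, pvBStep_hdr _ _ _ _ hsw]
        have h2 := ih (pvBFinish (out, key, cur)) [line] (some (PySem.Str.strip line))
        rw [pvIsLidKey_some, hl] at h2
        have hfin : pvBFinish (pvBFinish (out, key, cur), some (PySem.Str.strip line), [line])
            = pvBFinish (out, key, cur) ++ [line] := by
          simp only [pvBFinish, pvIsLidKey_some, hl, Bool.false_eq_true, reduceIte]
        rw [hfin] at h2
        exact h2
      | false =>
        rw [pvAStep_plain _ _ _ hl hsw, pvBStep_plain _ _ _ _ hsw]
        have h2 := ih out (cur ++ [line]) key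
        cases hk : pvIsLidKey key
        · have hfin : pvBFinish (out, key, cur ++ [line]) = pvBFinish (out, key, cur) ++ [line] := by
            simp only [pvBFinish, hk, Bool.false_eq_true, reduceIte, List.append_assoc]
          rw [hfin, hk] at h2
          simpa only [Bool.false_eq_true, reduceIte] using h2
        · have hfin : pvBFinish (out, key, cur ++ [line]) = pvBFinish (out, key, cur) := by
            simp only [pvBFinish, hk, reduceIte]
          rw [hfin, hk] at h2
          simpa only [reduceIte] using h2

-- ===== VERDICT (by name: the statement is the Claim_ definition above) =====
theorem remove_existing_lid_sections_py_spec : Claim_equal_remove_existing_lid_sections_py := by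
  intro lines _
  show remove_existing_lid_sections_py lines = remove_existing_lid_sections_py_alt lines
  have h2 := pv_inv lines [] [] none
  rw [show pvBFinish ([], none, []) = ([] : List String) from rfl,
    show pvIsLidKey none = false from rfl] at h2
  exact h2
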